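-- pv_equiv track=rewrite | github.com/srinidhi-ksp/Problem-solving | ITT-Python/Lab-questions/calculate_hit_and_near_hits.py | calculate_hits_and_near_hits
-- ===== SOURCE A (Python) =====
-- def calculate_hits_and_near_hits(code, guess):
--     """
--     Calculates hits (correct position) and near hits (wrong position)
--     for a given code and guess string.
--     """
--     hits = 0
--     near_hits = 0
--
--     # Store length to avoid calling len() repeatedly
--     n = len(code)
--
--     # Lists to keep track of characters that are already used in a hit or near hit
--     code_used = [False] * n
--     guess_used = [False] * n
--
--     # Step 1: Calculate Hits (Correct digit in correct position)
--     for i in range(n):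
--         if guess[i] == code[i]:
--             hits += 1
--             code_used[i] = True
--             guess_used[i] = True
--
--     # Step 2: Calculate Near Hits (Correct digit in wrong position)
--     for i in range(n):
--         if not guess_used[i]:
--             for j in range(n):
--                 if not code_used[j] and guess[i] == code[j]:
--                     near_hits += 1
--                     code_used[j] = True
--                     # guess_used[i] = True # Not strictly necessary here, but good practice
--                     break
--
--     return f"{hits}H{near_hits}N"
-- ===== SOURCE B (Python) =====
-- def calculate_hits_and_near_hits(code, guess):
--     """
--     Calculates hits (correct position) and near hits (wrong position)
--     for a given code and guess string.
--     O(n): hits in one pass over the paired positions; near hits as sum over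
--     non-hit code chars of min(frequency in non-hit code, frequency in non-hit guess).
--     """
--     pairs = [(code[i], guess[i]) for i in range(len(code))]
--     hits = sum(c == g for c, g in pairs)
--     rest = [(c, g) for c, g in pairs if c != g]
--     rc = {}
--     for c, _ in rest:
--         rc[c] = rc.get(c, 0) + 1
--     rg = {}
--     for _, g in rest:
--         rg[g] = rg.get(g, 0) + 1
--     near_hits = sum(min(v, rg.get(c, 0)) for c, v in rc.items())
--     return f"{hits}H{near_hits}N"
-- ===== Notes on version B (the rewrite author's own statement) =====
-- stated objective: faster
-- what changed: Replaced the quadratic used-flag marking scan (inner position scan with break per guess character) by a single-pass counting formulation: hits from one pass over the paired positions, near-hits as the sum over non-hit code characters of the minimum of their frequencies among non-hit code and non-hit guess positions.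
import Mathlib
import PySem

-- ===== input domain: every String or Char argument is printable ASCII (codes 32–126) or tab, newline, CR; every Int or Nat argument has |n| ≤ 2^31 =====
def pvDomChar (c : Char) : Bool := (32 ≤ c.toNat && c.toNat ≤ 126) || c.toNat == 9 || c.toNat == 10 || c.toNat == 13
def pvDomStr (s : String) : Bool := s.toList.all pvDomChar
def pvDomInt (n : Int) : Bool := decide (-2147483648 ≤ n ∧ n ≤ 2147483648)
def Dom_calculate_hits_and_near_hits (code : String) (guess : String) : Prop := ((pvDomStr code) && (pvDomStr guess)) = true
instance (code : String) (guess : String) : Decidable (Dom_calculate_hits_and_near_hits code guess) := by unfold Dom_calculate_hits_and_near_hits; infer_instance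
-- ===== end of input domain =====

-- B replaces A's quadratic used-flag marking by one-pass counting (hits over the
-- paired positions, near-hits as a sum of min frequencies over non-hit positions);
-- return values agree on Pre_ (both programs raise IndexError outside it).

-- ===== PORT A =====
-- inner 'for j in range(n): if not code_used[j] and guess[i] == code[j]: near_hits += 1; code_used[j] = True; break'
def pvInnerLoop (cs : List Char) (g : Char) : List Nat → List Bool → Nat × List Bool
  | [], cu => (0, cu)
  | j :: js, cu =>
    if cu.getD j true = false && g == cs.getD j ' ' then (1, cu.set j true)
    else pvInnerLoop cs g js cu

def pvAImpl (cs : List Char) (gs : List Char) : String :=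
  let n := cs.length
  -- Step 1: hits; marks code_used[i] and guess_used[i]
  let s1 := (List.range n).foldl
    (fun (st : Nat × List Bool × List Bool) i =>
      if gs.getD i '!' == cs.getD i '?' then
        (st.1 + 1, st.2.1.set i true, st.2.2.set i true)
      else st)
    (0, List.replicate n false, List.replicate n false)
  -- Step 2: near hits
  let s2 := (List.range n).foldl
    (fun (st : Nat × List Bool) i =>
      if s1.2.2.getD i true = false then
        let r := pvInnerLoop cs (gs.getD i '!') (List.range n) st.2
        (st.1 + r.1, r.2)
      else st)
    (0, s1.2.1)
  PySem.Int.toStr (s1.1 : Int) ++ "H" ++ PySem.Int.toStr (s2.1 : Int) ++ "N"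

def calculate_hits_and_near_hits (code : String) (guess : String) : String :=
  pvAImpl code.toList guess.toList

-- ===== PORT B =====
-- '[(code[i], guess[i]) for i in range(len(code))]'; indexing is in range on Pre_
-- (outside Pre_ Python raises IndexError, excluded), so getD's default is never used.
def pvBImpl (cs : List Char) (gs : List Char) : String :=
  let pairs := (List.range cs.length).map (fun i => (cs.getD i '?', gs.getD i '!'))
  let hits := (pairs.filter (fun p => p.1 == p.2)).length
  let rest := pairs.filter (fun p => !(p.1 == p.2))
  let rc := (rest.map Prod.fst).foldl (fun d c => d.insert c (d.getD c 0 + 1))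
              (PySem.Dict.empty : PySem.Dict Char Int)
  let rg := (rest.map Prod.snd).foldl (fun d g => d.insert g (d.getD g 0 + 1))
              (PySem.Dict.empty : PySem.Dict Char Int)
  let near := rc.items.foldl (fun acc p => acc + min p.2 (rg.getD p.1 0)) (0 : Int)
  PySem.Int.toStr (hits : Int) ++ "H" ++ PySem.Int.toStr near ++ "N"

def calculate_hits_and_near_hits_alt (code : String) (guess : String) : String :=
  pvBImpl code.toList guess.toList

-- ===== PRECONDITION & SPEC =====
-- A (and B) index guess[i] for every i < len(code), so both raise IndexError iff guess is shorter.
def Pre_calculate_hits_and_near_hits (code : String) (guess : String) : Prop :=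
  code.toList.length ≤ guess.toList.length
instance (code : String) (guess : String) : Decidable (Pre_calculate_hits_and_near_hits code guess) := by unfold Pre_calculate_hits_and_near_hits; infer_instance
def pvWitness_calculate_hits_and_near_hits : String × String := ("abcb", "bbca")

def Spec_calculate_hits_and_near_hits (code : String) (guess : String) (out : String) : Prop := out = calculate_hits_and_near_hits_alt code guess
instance (code : String) (guess : String) (out : String) : Decidable (Spec_calculate_hits_and_near_hits code guess out) := by unfold Spec_calculate_hits_and_near_hits; infer_instance

-- ===== CLAIM (what is proved, stated in full; the proofs are below) =====
def Claim_equal_calculate_hits_and_near_hits : Prop := ∀ (code : String) (guess : String), Dom_calculate_hits_and_near_hits code guess → Pre_calculate_hits_and_near_hits code guess → Spec_calculate_hits_and_near_hits code guess (calculate_hits_and_near_hits code guess)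

-- ===== LEMMAS AND PROOFS =====

-- on Pre_ the indexed pair list of B is exactly cs.zip gs
theorem pvPairs_eq (cs gs : List Char) (h : cs.length ≤ gs.length) :
    (List.range cs.length).map (fun i => (cs.getD i '?', gs.getD i '!')) = cs.zip gs := by
  apply List.ext_getElem
  · simp; omega
  · intro i hi hi'
    have hic : i < cs.length := by simpa using hi
    have hig : i < gs.length := by omega
    simp [List.getD_eq_getElem, List.getElem?_eq_getElem hic, List.getElem?_eq_getElem hig]

-- characters of code at still-unused positions, in position order
def pvAvail (cs : List Char) (cu : List Bool) : List Char :=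
  (cs.zip cu).filterMap (fun p => if p.2 then none else some p.1)

-- abstract greedy matching: one code character consumed per matched guess character
def pvGreedy : List Char → List Char → Nat
  | _, [] => 0
  | A, g :: r => if g ∈ A then 1 + pvGreedy (A.erase g) r else pvGreedy A r

theorem pvGreedy_card (r : List Char) : ∀ (A : List Char),
    pvGreedy A r = Multiset.card ((↑r : Multiset Char) ∩ (↑A : Multiset Char)) := by
  induction r with
  | nil => intro A; simp [pvGreedy]
  | cons g r ih =>
    intro A
    by_cases hg : g ∈ A
    · rw [pvGreedy, if_pos hg, ih]
      rw [show ((↑(g :: r) : Multiset Char)) = g ::ₘ (↑r : Multiset Char) from rfl,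
        Multiset.cons_inter_of_pos _ (by simpa using hg)]
      simp [Multiset.coe_erase]
      omega
    · rw [pvGreedy, if_neg hg, ih]
      rw [show ((↑(g :: r) : Multiset Char)) = g ::ₘ (↑r : Multiset Char) from rfl,
        Multiset.cons_inter_of_neg _ (by simpa using hg)]

theorem pvInnerLoop_shift (c : Char) (cs : List Char) (g : Char) (u : Bool)
    (js : List Nat) (cu : List Bool) :
    pvInnerLoop (c :: cs) g (js.map (· + 1)) (u :: cu) =
      ((pvInnerLoop cs g js cu).1, u :: (pvInnerLoop cs g js cu).2) := by
  induction js with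
  | nil => simp [pvInnerLoop]
  | cons j js ih =>
    simp only [List.map_cons, pvInnerLoop, List.getD_cons_succ, List.set_cons_succ]
    split_ifs with hc
    · rfl
    · exact ih

theorem pvAvail_cons_true (c : Char) (cs : List Char) (cu : List Bool) :
    pvAvail (c :: cs) (true :: cu) = pvAvail cs cu := by
  simp [pvAvail]

theorem pvAvail_cons_false (c : Char) (cs : List Char) (cu : List Bool) :
    pvAvail (c :: cs) (false :: cu) = c :: pvAvail cs cu := by
  simp [pvAvail]

theorem pvInnerLoop_spec (cs : List Char) : ∀ (cu : List Bool) (g : Char),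
    cu.length = cs.length →
    (g ∉ pvAvail cs cu → pvInnerLoop cs g (List.range cs.length) cu = (0, cu)) ∧
    (g ∈ pvAvail cs cu →
      (pvInnerLoop cs g (List.range cs.length) cu).1 = 1 ∧
      (pvInnerLoop cs g (List.range cs.length) cu).2.length = cs.length ∧
      pvAvail cs (pvInnerLoop cs g (List.range cs.length) cu).2 = (pvAvail cs cu).erase g) := by
  induction cs with
  | nil =>
    intro cu g hlen
    simp [pvAvail, pvInnerLoop]
  | cons c cs ih =>
    intro cu g hlen
    match cu with
    | u :: cu =>
      have hlen' : cu.length = cs.length := by simpa using hlen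
      rw [List.length_cons, List.range_succ_eq_map]
      have hstep : pvInnerLoop (c :: cs) g (0 :: (List.range cs.length).map (· + 1)) (u :: cu)
          = if u = false && g == c then (1, true :: cu)
            else ((pvInnerLoop cs g (List.range cs.length) cu).1,
                  u :: (pvInnerLoop cs g (List.range cs.length) cu).2) := by
        rw [pvInnerLoop]
        simp only [List.getD_cons_zero, List.set_cons_zero]
        split_ifs with hc
        · rfl
        · exact pvInnerLoop_shift c cs g u (List.range cs.length) cu
      obtain ⟨ihn, ihm⟩ := ih cu g hlen'
      cases u with
      | true =>
        rw [pvAvail_cons_true, hstep]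
        rw [if_neg (by simp)]
        refine ⟨fun hg => ?_, fun hg => ?_⟩
        · rw [ihn hg]
        · obtain ⟨h1, h2, h3⟩ := ihm hg
          exact ⟨h1, by simpa using h2, by rw [pvAvail_cons_true, h3]⟩
      | false =>
        rw [pvAvail_cons_false, hstep]
        by_cases hgc : g = c
        · subst hgc
          rw [if_pos (by simp)]
          refine ⟨fun hg => absurd (List.mem_cons_self) hg, fun _ => ?_⟩
          refine ⟨rfl, by simpa using hlen', ?_⟩
          rw [List.erase_cons_head, pvAvail_cons_true]
        · rw [if_neg (by simp [hgc])]
          refine ⟨fun hg => ?_, fun hg => ?_⟩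
          · have hg' : g ∉ pvAvail cs cu := fun h => hg (List.mem_cons_of_mem _ h)
            rw [ihn hg']
          · have hg' : g ∈ pvAvail cs cu := by
              rcases List.mem_cons.mp hg with h | h
              · exact absurd h hgc
              · exact h
            obtain ⟨h1, h2, h3⟩ := ihm hg'
            refine ⟨h1, by simpa using h2, ?_⟩
            rw [pvAvail_cons_false, h3, List.erase_cons_tail (by simpa using fun h => hgc h.symm)]

-- the same statement with the index list written as range' (the shape left in the goal)
theorem pvInnerLoop_spec' (cs : List Char) (cu : List Bool) (g : Char)
    (hlen : cu.length = cs.length) :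
    (g ∉ pvAvail cs cu → pvInnerLoop cs g (List.range' 0 cs.length) cu = (0, cu)) ∧
    (g ∈ pvAvail cs cu →
      (pvInnerLoop cs g (List.range' 0 cs.length) cu).1 = 1 ∧
      (pvInnerLoop cs g (List.range' 0 cs.length) cu).2.length = cs.length ∧
      pvAvail cs (pvInnerLoop cs g (List.range' 0 cs.length) cu).2 = (pvAvail cs cu).erase g) := by
  have := pvInnerLoop_spec cs cu g hlen
  rwa [List.range_eq_range'] at this

theorem pvTakeSucc {α : Type} (l : List α) (k : Nat) (h : k < l.length) :
    l.take (k+1) = l.take k ++ [l[k]] := by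
  rw [List.take_add_one, List.getElem?_eq_getElem h]; rfl

theorem pvPhase1 (cs gs : List Char) (h : cs.length ≤ gs.length) (k : Nat) (hk : k ≤ cs.length) :
    (List.range k).foldl
      (fun (st : Nat × List Bool × List Bool) i =>
        if gs.getD i '!' == cs.getD i '?' then
          (st.1 + 1, st.2.1.set i true, st.2.2.set i true)
        else st)
      (0, List.replicate cs.length false, List.replicate cs.length false)
    = ((((cs.zip gs).take k).filter (fun p => p.1 == p.2)).length,
       ((cs.zip gs).map (fun p => p.1 == p.2)).take k ++ List.replicate (cs.length - k) false,
       ((cs.zip gs).map (fun p => p.1 == p.2)).take k ++ List.replicate (cs.length - k) false) := by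
  induction k with
  | zero => simp
  | succ k ih =>
    have hk' : k ≤ cs.length := by omega
    have hkc : k < cs.length := by omega
    have hkg : k < gs.length := by omega
    have hkz : k < (cs.zip gs).length := by simp; omega
    have hkm : k < ((cs.zip gs).map (fun p => p.1 == p.2)).length := by simp; omega
    rw [List.range_succ, List.foldl_append, ih hk']
    simp only [List.foldl_cons, List.foldl_nil]
    rw [List.getD_eq_getElem gs '!' hkg, List.getD_eq_getElem cs '?' hkc]
    have hzk : (cs.zip gs)[k]'hkz = (cs[k], gs[k]) := by simp
    have hmk : ((cs.zip gs).map (fun p => p.1 == p.2))[k]'hkm = (cs[k] == gs[k]) := by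
      simp [hzk]
    have htm : ((cs.zip gs).map (fun p => p.1 == p.2)).take (k+1)
        = ((cs.zip gs).map (fun p => p.1 == p.2)).take k ++ [(cs[k] == gs[k])] := by
      rw [pvTakeSucc _ k hkm, hmk]
    have htz : (cs.zip gs).take (k+1) = (cs.zip gs).take k ++ [(cs[k], gs[k])] := by
      rw [pvTakeSucc _ k hkz, hzk]
    have hlen_take : (((cs.zip gs).map (fun p => p.1 == p.2)).take k).length = k := by
      simp; omega
    have hset : (((cs.zip gs).map (fun p => p.1 == p.2)).take k
          ++ List.replicate (cs.length - k) false).set k true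
        = ((cs.zip gs).map (fun p => p.1 == p.2)).take k
          ++ [true] ++ List.replicate (cs.length - (k+1)) false := by
      rw [List.set_append]
      rw [if_neg (by omega), hlen_take]
      have : cs.length - k = (cs.length - (k+1)) + 1 := by omega
      rw [this, List.replicate_succ]
      simp
    by_cases hc : gs[k] = cs[k]
    · rw [if_pos (by simpa using hc)]
      rw [htm, htz, List.filter_append]
      simp only [List.length_append]
      have : (cs[k] == gs[k]) = true := by simp [hc]
      rw [this] at htm ⊢
      simp only [List.filter_cons, this]
      rw [hset]
      simp [List.append_assoc]
    · rw [if_neg (by simpa using hc)]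
      rw [htm, htz, List.filter_append]
      have hfb : (cs[k] == gs[k]) = false := by simp; exact fun e => hc e.symm
      simp only [List.filter_cons, hfb, List.filter_nil, List.length_append]
      have : cs.length - k = (cs.length - (k+1)) + 1 := by omega
      rw [this, List.replicate_succ]
      simp [List.append_assoc]

theorem pvAvail_mask : ∀ (cs gs : List Char), cs.length ≤ gs.length →
    pvAvail cs ((cs.zip gs).map (fun p => p.1 == p.2)) =
      ((cs.zip gs).filter (fun p => !(p.1 == p.2))).map Prod.fst := by
  intro cs
  induction cs with
  | nil => intro gs h; simp [pvAvail]
  | cons c cs ih =>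
    intro gs h
    match gs with
    | g :: gs =>
      have h' : cs.length ≤ gs.length := by simpa using h
      by_cases hc : c = g
      · simp [pvAvail, hc, ← ih gs h', pvAvail]
      · simp [pvAvail, hc, ← ih gs h', pvAvail]

theorem pvPhase2 (cs gs : List Char) (h : cs.length ≤ gs.length) :
    ∀ (t k : Nat) (acc : Nat) (cu : List Bool), k + t = cs.length → cu.length = cs.length →
    ((List.range' k t).foldl
      (fun (st : Nat × List Bool) i =>
        if ((cs.zip gs).map (fun p => p.1 == p.2)).getD i true = false then
          (st.1 + (pvInnerLoop cs (gs.getD i '!') (List.range' 0 cs.length) st.2).1,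
           (pvInnerLoop cs (gs.getD i '!') (List.range' 0 cs.length) st.2).2)
        else st)
      (acc, cu)).1
    = acc + pvGreedy (pvAvail cs cu)
        ((((cs.zip gs).drop k).filter (fun p => !(p.1 == p.2))).map Prod.snd) := by
  intro t
  induction t with
  | zero =>
    intro k acc cu hkt hcu
    have : (cs.zip gs).drop k = [] := by
      apply List.drop_eq_nil_of_le
      simp; omega
    simp [this, pvGreedy]
  | succ t ih =>
    intro k acc cu hkt hcu
    have hkc : k < cs.length := by omega
    have hkg : k < gs.length := by omega
    have hkz : k < (cs.zip gs).length := by simp; omega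
    have hkm : k < ((cs.zip gs).map (fun p => p.1 == p.2)).length := by simp; omega
    rw [List.range'_succ, List.foldl_cons]
    rw [List.getD_eq_getElem _ true hkm, List.getD_eq_getElem gs '!' hkg]
    have hzk : (cs.zip gs)[k]'hkz = (cs[k], gs[k]) := by simp
    have hmk : ((cs.zip gs).map (fun p => p.1 == p.2))[k]'hkm = (cs[k] == gs[k]) := by simp [hzk]
    have hdrop : (cs.zip gs).drop k = (cs[k], gs[k]) :: (cs.zip gs).drop (k+1) := by
      rw [List.drop_eq_getElem_cons hkz, hzk]
    rw [hmk, hdrop]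
    by_cases hc : cs[k] = gs[k]
    · rw [if_neg (by simp [hc])]
      have : (List.filter (fun p => !(p.1 == p.2)) ((cs[k], gs[k]) :: (cs.zip gs).drop (k+1)))
           = (List.filter (fun p => !(p.1 == p.2)) ((cs.zip gs).drop (k+1))) := by
        simp [hc]
      rw [this, ih (k+1) acc cu (by omega) hcu]
    · rw [if_pos (by simp [hc])]
      have hfil : (List.filter (fun p => !(p.1 == p.2)) ((cs[k], gs[k]) :: (cs.zip gs).drop (k+1)))
           = (cs[k], gs[k]) :: (List.filter (fun p => !(p.1 == p.2)) ((cs.zip gs).drop (k+1))) := by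
        simp [hc]
      rw [hfil]
      simp only [List.map_cons]
      by_cases hmem : gs[k] ∈ pvAvail cs cu
      · obtain ⟨h1, h2, h3⟩ := (pvInnerLoop_spec' cs cu gs[k] hcu).2 hmem
        rw [ih (k+1) _ _ (by omega) h2]
        rw [h3, h1]
        rw [pvGreedy, if_pos hmem]
        omega
      · rw [(pvInnerLoop_spec' cs cu gs[k] hcu).1 hmem]
        rw [ih (k+1) _ _ (by omega) hcu]
        rw [pvGreedy, if_neg hmem]
        simp

theorem pvCardInter_sum (C G : List Char) :
    (Multiset.card ((↑G : Multiset Char) ∩ (↑C : Multiset Char)) : Int)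
      = ((PySem.List.dedup C).map (fun k => min ((C.count k : Int)) ((G.count k : Int)))).sum := by
  have hnodup : (PySem.List.dedup C).Nodup := PySem.List.nodup_dedup C
  have hfin : (PySem.List.dedup C).toFinset = C.toFinset := by
    ext a; simp
  have hsum := List.sum_toFinset (l := PySem.List.dedup C)
      (fun k => min ((C.count k : Int)) ((G.count k : Int))) hnodup
  rw [← hsum, hfin]
  have hsub : ((↑G : Multiset Char) ∩ (↑C : Multiset Char)).toFinset ⊆ C.toFinset := by
    intro a ha
    have : a ∈ ((↑G : Multiset Char) ∩ (↑C : Multiset Char)) := by simpa using ha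
    have := (Multiset.mem_inter.mp this).2
    simpa using this
  have hzero : ∀ a ∈ C.toFinset, a ∉ ((↑G : Multiset Char) ∩ (↑C : Multiset Char)).toFinset →
      Multiset.count a ((↑G : Multiset Char) ∩ (↑C : Multiset Char)) = 0 := by
    intro a _ ha
    rw [Multiset.count_eq_zero]
    simpa using ha
  have hcard : Multiset.card ((↑G : Multiset Char) ∩ (↑C : Multiset Char))
      = ∑ a ∈ C.toFinset, min (G.count a) (C.count a) := by
    rw [← Multiset.toFinset_sum_count_eq ((↑G : Multiset Char) ∩ (↑C : Multiset Char)),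
        Finset.sum_subset hsub hzero]
    apply Finset.sum_congr rfl
    intro a _
    simp
  rw [hcard]
  push_cast
  apply Finset.sum_congr rfl
  intro a _
  rw [min_comm]

theorem pvMain (cs gs : List Char) (h : cs.length ≤ gs.length) : pvAImpl cs gs = pvBImpl cs gs := by
  have hzlen : (cs.zip gs).length = cs.length := by simp; omega
  have hmlen : ((cs.zip gs).map (fun p => p.1 == p.2)).length = cs.length := by simp [hzlen]
  have htake : ((cs.zip gs).map (fun p => p.1 == p.2)).take cs.length
      ++ List.replicate (cs.length - cs.length) false
      = (cs.zip gs).map (fun p => p.1 == p.2) := by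
    simp [List.take_of_length_le (le_of_eq hmlen)]
  have hztake : (cs.zip gs).take cs.length = cs.zip gs :=
    List.take_of_length_le (le_of_eq hzlen)
  unfold pvAImpl pvBImpl
  rw [pvPairs_eq cs gs h]
  simp only []
  rw [pvPhase1 cs gs h cs.length le_rfl]
  rw [htake, hztake]
  simp only []
  rw [List.range_eq_range']
  rw [pvPhase2 cs gs h cs.length 0 0 ((cs.zip gs).map (fun p => p.1 == p.2)) (by omega) hmlen]
  rw [List.drop_zero, pvAvail_mask cs gs h]
  rw [pvGreedy_card]
  simp only [Nat.zero_add]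
  rw [pvCardInter_sum]
  rw [PySem.Dict.foldl_insert_getD_add_one_eq_counter, PySem.Dict.foldl_insert_getD_add_one_eq_counter]
  rw [PySem.Dict.items_counter]
  rw [List.foldl_map]
  simp only [PySem.Dict.getD_counter]
  rw [PySem.List.foldl_add _ (fun k => min ((List.count k (((cs.zip gs).filter (fun p => !(p.1 == p.2))).map Prod.fst) : Int)) ((List.count k (((cs.zip gs).filter (fun p => !(p.1 == p.2))).map Prod.snd) : Int))) 0]
  rw [PySem.List.dedup_eq_ofList]
  simp

-- ===== VERDICT (by name: the statement is the Claim_ definition above) =====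
theorem calculate_hits_and_near_hits_spec : Claim_equal_calculate_hits_and_near_hits := by
  intro code guess _ hpre
  unfold Spec_calculate_hits_and_near_hits calculate_hits_and_near_hits calculate_hits_and_near_hits_alt
  exact pvMain _ _ hpre
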